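-- pv_equiv track=rewrite | github.com/PanicAThePython/grafos | trab01.py | isCompleto
-- ===== SOURCE A (Python) =====
-- def isMultigrafo(matriz):
--     multigrafo = False
--     for linha in range(matriz.__len__()):
--         for coluna in range(matriz.__len__()):
--             if matriz[linha][coluna] > 1:
--                 multigrafo = True
--             if linha == coluna:
--                 if matriz[linha][coluna] > 0:
--                     multigrafo = True
--     return multigrafo
--
-- def isCompleto(matriz):
--     if (isMultigrafo(matriz)):
--         return False
--     else:
--         for linha in range(matriz.__len__()):
--             for coluna in range(matriz.__len__()):
--                 if coluna == linha:
--                     if matriz[linha][coluna] != 0: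
--                         return False
--                 if coluna != linha:
--                     if matriz[linha][coluna] != 1:
--                         return False
--         return True
-- ===== SOURCE B (Python) =====
-- def isCompleto(matriz):
--     n = len(matriz)
--     return all(matriz[i][j] == (0 if i == j else 1)
--                for i in range(n) for j in range(n))
-- ===== Notes on version B (the rewrite author's own statement) =====
-- stated objective: simpler
-- what changed: Drops the isMultigrafo pre-scan (redundant given the cell checks) and the flag/early-return double loop: B is one short-circuiting all() comprehension checking each cell equals 0 on the diagonal and 1 off it.
import Mathlib
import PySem

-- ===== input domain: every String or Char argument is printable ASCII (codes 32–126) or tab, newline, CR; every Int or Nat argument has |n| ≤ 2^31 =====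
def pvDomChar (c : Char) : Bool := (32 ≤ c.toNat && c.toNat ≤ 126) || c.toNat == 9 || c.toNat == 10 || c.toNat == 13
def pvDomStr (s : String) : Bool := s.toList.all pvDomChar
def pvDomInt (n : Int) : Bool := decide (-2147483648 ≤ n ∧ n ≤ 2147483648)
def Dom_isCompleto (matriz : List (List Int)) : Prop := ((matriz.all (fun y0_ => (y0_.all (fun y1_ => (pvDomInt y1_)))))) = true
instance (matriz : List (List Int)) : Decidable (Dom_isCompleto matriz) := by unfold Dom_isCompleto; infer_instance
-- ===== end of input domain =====

-- B replaces A's isMultigrafo pre-scan plus flag/early-return double loop by a single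
-- all-comprehension (cell = 0 on the diagonal, 1 off it); objective: simpler.

-- matriz[linha][coluna] for in-range indices (Pre_ keeps every access in range)
def pvCell (m : List (List Int)) (i j : Int) : Int :=
  (PySem.List.pyGet? ((PySem.List.pyGet? m i).getD []) j).getD 0

-- ===== PORT A =====
def isMultigrafo (m : List (List Int)) : Bool :=
  (PySem.List.pyRange 0 m.length 1).foldl (fun mg linha =>
    (PySem.List.pyRange 0 m.length 1).foldl (fun mg coluna =>
      let mg1 := if pvCell m linha coluna > 1 then true else mg
      if linha == coluna then
        (if pvCell m linha coluna > 0 then true else mg1)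
      else mg1) mg) false

def pvLoopCols (m : List (List Int)) (linha : Int) : List Int → Bool
  | [] => true
  | c :: rest =>
    if c == linha && pvCell m linha c != 0 then false
    else if c != linha && pvCell m linha c != 1 then false
    else pvLoopCols m linha rest

def pvLoopRows (m : List (List Int)) : List Int → Bool
  | [] => true
  | r :: rest =>
    if pvLoopCols m r (PySem.List.pyRange 0 m.length 1) then pvLoopRows m rest
    else false

def isCompleto (matriz : List (List Int)) : Bool :=
  if isMultigrafo matriz then false
  else pvLoopRows matriz (PySem.List.pyRange 0 matriz.length 1)

-- ===== PORT B =====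
def isCompleto_alt (matriz : List (List Int)) : Bool :=
  (PySem.List.pyRange 0 matriz.length 1).all (fun i =>
    (PySem.List.pyRange 0 matriz.length 1).all (fun j =>
      pvCell matriz i j == if i == j then (0 : Int) else 1))

-- ===== PRECONDITION & SPEC =====
-- Pre_ excludes exactly the inputs on which Python A raises IndexError: some row
-- shorter than the number of rows (both programs index matriz[i][j], j < len(matriz)).
def Pre_isCompleto (matriz : List (List Int)) : Prop :=
  ∀ row ∈ matriz, matriz.length ≤ row.length
instance (matriz : List (List Int)) : Decidable (Pre_isCompleto matriz) := by
  unfold Pre_isCompleto; infer_instance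
def pvWitness_isCompleto : List (List Int) := [[0, 1], [1, 0]]

def Spec_isCompleto (matriz : List (List Int)) (out : Bool) : Prop := out = isCompleto_alt matriz
instance (matriz : List (List Int)) (out : Bool) : Decidable (Spec_isCompleto matriz out) := by unfold Spec_isCompleto; infer_instance

-- ===== CLAIM (what is proved, stated in full; the proofs are below) =====
def Claim_equal_isCompleto : Prop := ∀ (matriz : List (List Int)), Dom_isCompleto matriz → Pre_isCompleto matriz → Spec_isCompleto matriz (isCompleto matriz)

-- ===== LEMMAS AND PROOFS =====

theorem pv_foldl_or {α : Type} (p : α → Bool) (g : Bool → α → Bool)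
    (h : ∀ mg x, g mg x = (mg || p x)) :
    ∀ (l : List α) (b : Bool), l.foldl g b = (b || l.any p) := by
  intro l
  induction l with
  | nil => simp
  | cons x xs ih => intro b; simp [List.foldl_cons, ih, h, Bool.or_assoc]

theorem pv_step (m : List (List Int)) (i : Int) (mg : Bool) (j : Int) :
    (let mg1 := if pvCell m i j > 1 then true else mg;
     if i == j then (if pvCell m i j > 0 then true else mg1) else mg1)
    = (mg || (decide (pvCell m i j > 1) || (i == j && decide (pvCell m i j > 0)))) := by
  by_cases hij : i = j
  · subst hij
    by_cases h0 : pvCell m i i > 0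
    · simp [h0]
    · have h1 : ¬ pvCell m i i > 1 := by omega
      simp [h0, h1]
  · have hij' : (i == j) = false := by simpa using hij
    by_cases h1 : pvCell m i j > 1 <;> simp [hij', h1]

theorem pv_mult_any (m : List (List Int)) :
    isMultigrafo m =
      (PySem.List.pyRange 0 m.length 1).any (fun i =>
        (PySem.List.pyRange 0 m.length 1).any (fun j =>
          decide (pvCell m i j > 1) || (i == j && decide (pvCell m i j > 0)))) := by
  unfold isMultigrafo
  rw [pv_foldl_or _ _ (fun mg i =>
        pv_foldl_or _ _ (fun mg' j => pv_step m i mg' j) _ mg), Bool.false_or]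

theorem pv_cols_all (m : List (List Int)) (i : Int) (cols : List Int) :
    pvLoopCols m i cols =
      cols.all (fun j => pvCell m i j == if i == j then (0 : Int) else 1) := by
  induction cols with
  | nil => rfl
  | cons c rest ih =>
    simp only [pvLoopCols, List.all_cons, ih]
    by_cases hc : c = i
    · subst hc
      by_cases h0 : pvCell m c c = 0 <;> simp [h0]
    · have hc1 : (c == i) = false := by simpa using hc
      have hc2 : (i == c) = false := by simpa using Ne.symm hc
      by_cases h1 : pvCell m i c = 1 <;> simp [hc1, hc2, h1, hc]

theorem pv_rows_all (m : List (List Int)) (rows : List Int) :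
    pvLoopRows m rows =
      rows.all (fun r => pvLoopCols m r (PySem.List.pyRange 0 m.length 1)) := by
  induction rows with
  | nil => rfl
  | cons r rest ih =>
    simp only [pvLoopRows, List.all_cons, ih]
    by_cases h : pvLoopCols m r (PySem.List.pyRange 0 m.length 1) <;> simp [h]

theorem pv_alt_no_mult (m : List (List Int)) (h : isCompleto_alt m = true) :
    isMultigrafo m = false := by
  rw [pv_mult_any]
  unfold isCompleto_alt at h
  simp only [List.all_eq_true] at h
  simp only [List.any_eq_false]
  intro i hi hj
  rw [List.any_eq_true] at hj
  obtain ⟨j, hjm, hq⟩ := hj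
  have hp := h i hi j hjm
  by_cases hij : i = j
  · subst hij
    simp at hp
    simp [hp] at hq
  · simp [hij] at hp
    simp [hij, hp] at hq

-- ===== VERDICT (by name: the statement is the Claim_ definition above) =====
theorem isCompleto_spec : Claim_equal_isCompleto := by
  intro m _ _
  unfold Spec_isCompleto isCompleto
  have hr : pvLoopRows m (PySem.List.pyRange 0 m.length 1) = isCompleto_alt m := by
    rw [pv_rows_all]
    unfold isCompleto_alt
    congr 1
    funext r
    rw [pv_cols_all]
  cases hm : isMultigrafo m with
  | false => simp [hr]
  | true =>
    simp only [if_true]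
    cases halt : isCompleto_alt m with
    | false => rfl
    | true => rw [pv_alt_no_mult m halt] at hm; exact absurd hm (by simp)
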